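-- pv_equiv track=rewrite | github.com/Nishi-Taiga/schedule_automation | app.py | _merge_weekly_teachers
-- ===== SOURCE A (Python) =====
-- def _merge_weekly_teachers(base_wt, overlay_wt):
--     """2つのweeklyTeachers構造をunionマージする。Returns: マージ済みの新しいリスト"""
--     if not base_wt:
--         return list(overlay_wt) if overlay_wt else []
--     if not overlay_wt:
--         return list(base_wt)
--     max_weeks = max(len(base_wt), len(overlay_wt))
--     merged = []
--     for wi in range(max_weeks):
--         bw = base_wt[wi] if wi < len(base_wt) else {}
--         ow = overlay_wt[wi] if wi < len(overlay_wt) else {}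
--         week = {}
--         for day in set(list(bw.keys()) + list(ow.keys())):
--             bd = bw.get(day, {})
--             od = ow.get(day, {})
--             day_data = {}
--             for ts in set(list(bd.keys()) + list(od.keys())):
--                 day_data[ts] = sorted(set(bd.get(ts, [])) | set(od.get(ts, [])))
--             week[day] = day_data
--         merged.append(week)
--     return merged
-- ===== SOURCE B (Python) =====
-- def _merge_weekly_teachers(base_wt, overlay_wt):
--     """Union-merge two weeklyTeachers structures (accumulate-then-normalize)."""
--     if not base_wt:
--         return list(overlay_wt) if overlay_wt else []
--     if not overlay_wt:
--         return list(base_wt)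
--     n = max(len(base_wt), len(overlay_wt))
--     merged = []
--     for wi in range(n):
--         bw = base_wt[wi] if wi < len(base_wt) else {}
--         ow = overlay_wt[wi] if wi < len(overlay_wt) else {}
--         # pass 1: seed the accumulator with the base week's teacher sets
--         acc = {day: {ts: set(t) for ts, t in slots.items()} for day, slots in bw.items()}
--         # pass 2: fold the overlay week's items into the accumulator
--         for day, slots in ow.items():
--             dacc = acc.get(day)
--             if dacc is None:
--                 acc[day] = {ts: set(t) for ts, t in slots.items()}
--             else:
--                 for ts, teachers in slots.items():
--                     s = dacc.get(ts)
--                     if s is None: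
--                         dacc[ts] = set(teachers)
--                     else:
--                         s.update(teachers)
--         # pass 3: normalize the sets to sorted teacher lists
--         merged.append({day: {ts: sorted(s) for ts, s in dacc.items()}
--                        for day, dacc in acc.items()})
--     return merged
-- ===== Notes on version B (the rewrite author's own statement) =====
-- stated objective: alternative
-- what changed: Per week, instead of A's union-of-key-sets traversal with double lookups at both nesting levels, B seeds a nested set-valued accumulator from the base week's items, folds the overlay week's items into it with in-place upserts, and then normalizes the accumulator into sorted teacher lists in a final pass.
import Mathlib
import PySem

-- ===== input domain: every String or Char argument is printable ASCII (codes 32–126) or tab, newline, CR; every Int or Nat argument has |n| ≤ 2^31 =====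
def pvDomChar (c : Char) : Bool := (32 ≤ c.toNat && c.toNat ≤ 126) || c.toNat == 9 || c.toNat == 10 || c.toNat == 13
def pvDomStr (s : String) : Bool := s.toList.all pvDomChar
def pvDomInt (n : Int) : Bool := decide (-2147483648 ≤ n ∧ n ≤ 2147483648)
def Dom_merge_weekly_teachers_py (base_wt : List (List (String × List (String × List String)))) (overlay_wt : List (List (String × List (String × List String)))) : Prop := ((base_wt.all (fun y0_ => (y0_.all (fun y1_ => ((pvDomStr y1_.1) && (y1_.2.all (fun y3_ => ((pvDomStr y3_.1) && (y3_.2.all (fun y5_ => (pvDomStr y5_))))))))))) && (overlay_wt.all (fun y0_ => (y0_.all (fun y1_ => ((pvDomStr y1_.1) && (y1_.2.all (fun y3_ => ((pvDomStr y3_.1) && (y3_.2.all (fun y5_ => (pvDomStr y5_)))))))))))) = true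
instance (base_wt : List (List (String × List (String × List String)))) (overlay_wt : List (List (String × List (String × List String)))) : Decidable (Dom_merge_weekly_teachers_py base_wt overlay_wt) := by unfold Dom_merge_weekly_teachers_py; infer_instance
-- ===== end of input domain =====

-- B restructures the per-week merge as accumulate-then-normalize (two item passes with in-place upserts,
-- then one normalization pass), instead of A's union-of-key-sets with double lookups; objective: alternative.
-- Python dicts are association lists here; lookups are first-match.

-- ===== PORT A =====
-- d.get(k, e) on an association list (first match)
def pvGetD {α : Type} (d : List (String × α)) (k : String) (e : α) : α :=
  match d.find? (fun p => p.1 == k) with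
  | some p => p.2
  | none => e

def merge_weekly_teachers_py (base_wt : List (List (String × List (String × List String)))) (overlay_wt : List (List (String × List (String × List String)))) : List (List (String × List (String × List String))) :=
  if base_wt = [] then (if overlay_wt = [] then [] else overlay_wt)
  else if overlay_wt = [] then base_wt
  else
    (List.range (max base_wt.length overlay_wt.length)).foldl (fun merged wi =>
      let bw := if wi < base_wt.length then base_wt.getD wi [] else []
      let ow := if wi < overlay_wt.length then overlay_wt.getD wi [] else []
      merged ++ [(PySem.Set.ofList (bw.map Prod.fst ++ ow.map Prod.fst)).foldl (fun week day =>
        let bd := pvGetD bw day []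
        let od := pvGetD ow day []
        week ++ [(day, (PySem.Set.ofList (bd.map Prod.fst ++ od.map Prod.fst)).foldl (fun day_data ts =>
          day_data ++ [(ts, PySem.List.sorted (PySem.Set.union (PySem.Set.ofList (pvGetD bd ts [])) (pvGetD od ts [])) (fun x => x) false)]) [])]) []]) []

-- ===== PORT B =====
-- modify the (first-match) entry at key k in place (f), or append (k, v) if k is absent
-- (models B's "d.get(k); if None: d[k] = v; else: mutate in place" upsert pattern)
def pvUpsert {α : Type} (d : List (String × α)) (k : String) (v : α) (f : α → α) : List (String × α) :=
  match d with
  | [] => [(k, v)]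
  | p :: rest => if p.1 == k then (p.1, f p.2) :: rest else p :: pvUpsert rest k v f

-- pass-1 seeding: one day dict normalized to teacher sets ({ts: set(t) ...})
def pvNormDay (slots : List (String × List String)) : List (String × PySem.Set String) :=
  slots.map (fun q => (q.1, PySem.Set.ofList q.2))

-- pass-2 inner loop: fold one day's timeslot items into an existing day accumulator
def pvMergeDay (dacc : List (String × PySem.Set String)) (slots : List (String × List String)) : List (String × PySem.Set String) :=
  slots.foldl (fun dacc q => pvUpsert dacc q.1 (PySem.Set.ofList q.2) (fun s => PySem.Set.update s q.2)) dacc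

def merge_weekly_teachers_py_alt (base_wt : List (List (String × List (String × List String)))) (overlay_wt : List (List (String × List (String × List String)))) : List (List (String × List (String × List String))) :=
  if base_wt = [] then (if overlay_wt = [] then [] else overlay_wt)
  else if overlay_wt = [] then base_wt
  else
    (List.range (max base_wt.length overlay_wt.length)).foldl (fun merged wi =>
      let bw := if wi < base_wt.length then base_wt.getD wi [] else []
      let ow := if wi < overlay_wt.length then overlay_wt.getD wi [] else []
      let acc := ow.foldl (fun acc p => pvUpsert acc p.1 (pvNormDay p.2) (fun dacc => pvMergeDay dacc p.2))
                   (bw.map (fun p => (p.1, pvNormDay p.2)))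
      merged ++ [acc.map (fun p => (p.1, p.2.map (fun q => (q.1, PySem.List.sorted q.2 (fun x => x) false))))]) []

-- ===== PRECONDITION & SPEC =====
-- Pre_ says the association lists really encode Python dicts: no duplicate keys at the week level or
-- the day level. Duplicate-keyed association lists do not arise from any Python input (a dict cannot
-- hold a key twice), so nothing A returns on is excluded.
def Pre_merge_weekly_teachers_py (base_wt : List (List (String × List (String × List String)))) (overlay_wt : List (List (String × List (String × List String)))) : Prop :=
  (∀ w ∈ base_wt, (w.map Prod.fst).Nodup ∧ ∀ p ∈ w, (p.2.map Prod.fst).Nodup) ∧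
  (∀ w ∈ overlay_wt, (w.map Prod.fst).Nodup ∧ ∀ p ∈ w, (p.2.map Prod.fst).Nodup)
instance (base_wt : List (List (String × List (String × List String)))) (overlay_wt : List (List (String × List (String × List String)))) : Decidable (Pre_merge_weekly_teachers_py base_wt overlay_wt) := by unfold Pre_merge_weekly_teachers_py; infer_instance

def pvWitness_merge_weekly_teachers_py : (List (List (String × List (String × List String)))) × (List (List (String × List (String × List String)))) :=
  ([[("Mon", [("1", ["b", "a"])])]],
   [[("Mon", [("1", ["c", "a"]), ("2", [])]), ("Tue", [])], []])

def Spec_merge_weekly_teachers_py (base_wt : List (List (String × List (String × List String)))) (overlay_wt : List (List (String × List (String × List String)))) (out : List (List (String × List (String × List String)))) : Prop := out = merge_weekly_teachers_py_alt base_wt overlay_wt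
instance (base_wt : List (List (String × List (String × List String)))) (overlay_wt : List (List (String × List (String × List String)))) (out : List (List (String × List (String × List String)))) : Decidable (Spec_merge_weekly_teachers_py base_wt overlay_wt out) := by unfold Spec_merge_weekly_teachers_py; infer_instance

-- ===== CLAIM (what is proved, stated in full; the proofs are below) =====
def Claim_equal_merge_weekly_teachers_py : Prop := ∀ (base_wt : List (List (String × List (String × List String)))) (overlay_wt : List (List (String × List (String × List String)))), Dom_merge_weekly_teachers_py base_wt overlay_wt → Pre_merge_weekly_teachers_py base_wt overlay_wt → Spec_merge_weekly_teachers_py base_wt overlay_wt (merge_weekly_teachers_py base_wt overlay_wt)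

-- ===== LEMMAS AND PROOFS =====

theorem pvUpsert_fresh {α : Type} (d : List (String × α)) (k : String) (v : α) (f : α → α)
    (h : ∀ p ∈ d, p.1 ≠ k) : pvUpsert d k v f = d ++ [(k, v)] := by
  induction d with
  | nil => rfl
  | cons p rest ih =>
    have hp : p.1 ≠ k := h p (by simp)
    simp [pvUpsert, hp, ih (fun q hq => h q (by simp [hq]))]

theorem pv_map_modkey_id {α : Type} (d : List (String × α)) (k : String) (f : α → α)
    (h : ∀ p ∈ d, p.1 ≠ k) :
    d.map (fun p => if p.1 = k then (p.1, f p.2) else p) = d := by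
  apply List.map_congr_left ?_ |>.trans (List.map_id d)
  intro p hp
  simp [h p hp]

theorem pvUpsert_mem {α : Type} (d : List (String × α)) (k : String) (v : α) (f : α → α)
    (hnd : (d.map Prod.fst).Nodup) (hk : k ∈ d.map Prod.fst) :
    pvUpsert d k v f = d.map (fun p => if p.1 = k then (p.1, f p.2) else p) := by
  induction d with
  | nil => simp at hk
  | cons p rest ih =>
    simp only [List.map_cons, List.nodup_cons] at hnd
    by_cases hp : p.1 = k
    · have hrest : ∀ q ∈ rest, q.1 ≠ k := by
        intro q hq hqk
        apply hnd.1
        rw [hp, ← hqk]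
        exact List.mem_map_of_mem hq
      simp [pvUpsert, hp, pv_map_modkey_id rest k f hrest]
    · have hk' : k ∈ rest.map Prod.fst := by
        rcases List.mem_cons.mp hk with h | h
        · exact absurd h.symm hp
        · exact h
      simp [pvUpsert, hp, ih hnd.2 hk']

theorem pv_keys_modkey {α : Type} (d : List (String × α)) (k : String) (f : α → α) :
    (d.map (fun p => if p.1 = k then (p.1, f p.2) else p)).map Prod.fst = d.map Prod.fst := by
  rw [List.map_map]
  apply List.map_congr_left
  intro p _
  by_cases hp : p.1 = k <;> simp [hp]

theorem pvGetD_mem {α : Type} (d : List (String × α)) (e : α)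
    (hnd : (d.map Prod.fst).Nodup) (p : String × α) (hp : p ∈ d) : pvGetD d p.1 e = p.2 := by
  induction d with
  | nil => simp at hp
  | cons q rest ih =>
    simp only [List.map_cons, List.nodup_cons] at hnd
    rcases List.mem_cons.mp hp with h | h
    · subst h; simp [pvGetD, List.find?]
    · have hq : ¬(q.1 == p.1) = true := by
        simp only [beq_iff_eq]
        intro hqp
        apply hnd.1
        rw [hqp]
        exact List.mem_map_of_mem h
      have := ih hnd.2 h
      simpa [pvGetD, List.find?, hq] using this

theorem pvGetD_fresh {α : Type} (d : List (String × α)) (k : String) (e : α)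
    (h : ∀ p ∈ d, p.1 ≠ k) : pvGetD d k e = e := by
  have : d.find? (fun p => p.1 == k) = none := by
    rw [List.find?_eq_none]
    intro p hp
    simp [h p hp]
  simp [pvGetD, this]

theorem pv_foldl_upsert {β γ : Type} (g : β → γ → γ) (h : β → γ) :
    ∀ (l : List (String × β)) (init : List (String × γ)),
    (l.map Prod.fst).Nodup → (init.map Prod.fst).Nodup →
    l.foldl (fun acc p => pvUpsert acc p.1 (h p.2) (g p.2)) init
    = init.map (fun p => match l.find? (fun q => q.1 == p.1) with
        | some q => (p.1, g q.2 p.2)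
        | none => p)
      ++ (l.filter (fun q => !((init.map Prod.fst).contains q.1))).map (fun q => (q.1, h q.2)) := by
  intro l
  induction l with
  | nil =>
    intro init _ _
    simp [List.find?]
  | cons q t ih =>
    intro init hl hinit
    simp only [List.map_cons, List.nodup_cons] at hl
    have hqt : ∀ r ∈ t, ¬(r.1 == q.1) = true := by
      intro r hr
      simp only [beq_iff_eq]
      intro hh
      apply hl.1
      rw [← hh]
      exact List.mem_map_of_mem hr
    rw [List.foldl_cons]
    by_cases hq : q.1 ∈ init.map Prod.fst
    · rw [pvUpsert_mem init q.1 (h q.2) (g q.2) hinit hq]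
      rw [ih _ hl.2 (by rw [pv_keys_modkey]; exact hinit)]
      rw [pv_keys_modkey]
      have hfq : (!(init.map Prod.fst).contains q.1) = false := by simpa using hq
      rw [List.filter_cons, hfq]
      simp only [Bool.false_eq_true, if_false]
      congr 1
      rw [List.map_map]
      apply List.map_congr_left
      intro p hp
      by_cases hpq : p.1 = q.1
      · have htn : t.find? (fun r => r.1 == q.1) = none := by
          rw [List.find?_eq_none]
          exact hqt
        simp [Function.comp, hpq, htn]
      · have hne : (q.1 == p.1) = false := by
          simp only [beq_eq_false_iff_ne, ne_eq]
          exact fun hh => hpq hh.symm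
        simp only [Function.comp, if_neg hpq, List.find?_cons, hne]
    · have hfresh : ∀ p ∈ init, p.1 ≠ q.1 := by
        intro p hp hh
        apply hq
        rw [← hh]
        exact List.mem_map_of_mem hp
      rw [pvUpsert_fresh init q.1 (h q.2) (g q.2) hfresh]
      have hkeys : (init ++ [(q.1, h q.2)]).map Prod.fst = init.map Prod.fst ++ [q.1] := by simp
      have hnd' : ((init ++ [(q.1, h q.2)]).map Prod.fst).Nodup := by
        rw [hkeys]
        apply List.Nodup.append hinit (List.nodup_singleton _)
        intro a ha hmem
        rw [List.mem_singleton] at hmem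
        subst hmem
        exact hq ha
      rw [ih _ hl.2 hnd', hkeys]
      have htn : t.find? (fun r => r.1 == q.1) = none := by
        rw [List.find?_eq_none]
        exact hqt
      have h1 : init.map (fun p => match t.find? (fun r => r.1 == p.1) with
          | some r => (p.1, g r.2 p.2)
          | none => p)
          = init.map (fun p => match (q :: t).find? (fun r => r.1 == p.1) with
          | some r => (p.1, g r.2 p.2)
          | none => p) := by
        apply List.map_congr_left
        intro p hp
        have hne : (q.1 == p.1) = false := by
          simp only [beq_eq_false_iff_ne, ne_eq]
          exact fun hh => hfresh p hp hh.symm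
        simp only [List.find?_cons, hne]
      have h2 : t.filter (fun r => !((init.map Prod.fst ++ [q.1]).contains r.1))
          = t.filter (fun r => !((init.map Prod.fst).contains r.1)) := by
        apply List.filter_congr
        intro r hr
        have hne : r.1 ≠ q.1 := by simpa using hqt r hr
        simp [hne]
      rw [List.map_append, h1, h2]
      have hfq : (!(init.map Prod.fst).contains q.1) = true := by simpa using hq
      rw [List.filter_cons, hfq]
      simp [List.find?_cons, htn]

theorem pv_set_update_nodup {α : Type} [DecidableEq α] (B : List α) :
    ∀ (s : List α), B.Nodup → PySem.Set.update s B = s ++ B.filter (fun x => !s.contains x) := by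
  induction B with
  | nil => intro s _; simp [PySem.Set.update]
  | cons b B ih =>
    intro s hB
    simp only [List.nodup_cons] at hB
    have step : PySem.Set.update s (b :: B) = PySem.Set.update (PySem.Set.add s b) B := rfl
    by_cases hb : b ∈ s
    · have hadd : PySem.Set.add s b = s := by
        simp [PySem.Set.add, PySem.Set.contains, hb]
      rw [step, hadd, ih s hB.2, List.filter_cons]
      simp [hb]
    · have hadd : PySem.Set.add s b = s ++ [b] := by
        simp [PySem.Set.add, PySem.Set.contains, hb]
      rw [step, hadd, ih _ hB.2, List.filter_cons]
      have hfl : B.filter (fun x => !(s ++ [b]).contains x) = B.filter (fun x => !s.contains x) := by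
        apply List.filter_congr
        intro x hx
        have hxb : x ≠ b := fun hh => hB.1 (hh ▸ hx)
        simp [hxb]
      rw [hfl]
      simp [hb]

theorem pv_set_ofList_append (A B : List String) (hA : A.Nodup) (hB : B.Nodup) :
    PySem.Set.ofList (A ++ B) = A ++ B.filter (fun x => !A.contains x) := by
  have h1 : PySem.Set.ofList (A ++ B) = PySem.Set.update (PySem.Set.ofList A) B := by
    rw [PySem.Set.ofList_eq_foldl, PySem.Set.ofList_eq_foldl, List.foldl_append]
    rfl
  have h2 : PySem.Set.ofList A = A := by
    rw [PySem.Set.ofList_eq_foldl]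
    have := pv_set_update_nodup A [] hA
    simpa [PySem.Set.update] using this
  rw [h1, h2, pv_set_update_nodup B A hB]

theorem pv_mergeEq {β γ : Type} (g : β → γ → γ) (h : β → γ) (e : β) (c : β → β → γ) (P : β → Prop)
    (hBB : ∀ b o, P b → P o → c b o = g o (h b))
    (hB : ∀ b, P b → c b e = h b)
    (hO : ∀ o, P o → c e o = h o)
    (bd od : List (String × β))
    (h1 : (bd.map Prod.fst).Nodup) (h2 : (od.map Prod.fst).Nodup)
    (hP1 : ∀ p ∈ bd, P p.2) (hP2 : ∀ p ∈ od, P p.2) :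
    (PySem.Set.ofList (bd.map Prod.fst ++ od.map Prod.fst)).map
        (fun k => (k, c (pvGetD bd k e) (pvGetD od k e)))
    = od.foldl (fun acc p => pvUpsert acc p.1 (h p.2) (g p.2))
        (bd.map (fun p => (p.1, h p.2))) := by
  have hkeys0 : (bd.map (fun p => (p.1, h p.2))).map Prod.fst = bd.map Prod.fst := by
    rw [List.map_map]; rfl
  rw [pv_foldl_upsert g h od _ h2 (by rw [hkeys0]; exact h1)]
  rw [hkeys0]
  rw [pv_set_ofList_append _ _ h1 h2, List.map_append]
  congr 1
  · rw [List.map_map, List.map_map]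
    apply List.map_congr_left
    intro p hp
    simp only [Function.comp]
    cases hfind : od.find? (fun q => q.1 == p.1) with
    | some q =>
      have hqmem : q ∈ od := List.mem_of_find?_eq_some hfind
      have hget_od : pvGetD od p.1 e = q.2 := by simp [pvGetD, hfind]
      rw [pvGetD_mem bd e h1 p hp, hget_od,
        hBB p.2 q.2 (hP1 p hp) (hP2 q hqmem)]
    | none =>
      have hget_od : pvGetD od p.1 e = e := by simp [pvGetD, hfind]
      rw [pvGetD_mem bd e h1 p hp, hget_od, hB p.2 (hP1 p hp)]
  · have hfm : (od.map Prod.fst).filter (fun x => !(bd.map Prod.fst).contains x)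
        = (od.filter (fun q => !(bd.map Prod.fst).contains q.1)).map Prod.fst := by
      rw [List.filter_map]
      rfl
    rw [hfm, List.map_map]
    apply List.map_congr_left
    intro q hq
    rw [List.mem_filter] at hq
    have hfresh : ∀ p ∈ bd, p.1 ≠ q.1 := by
      intro p hp hh
      have hmem : q.1 ∈ bd.map Prod.fst := by
        rw [← hh]
        exact List.mem_map_of_mem hp
      exact absurd hq.2 (by simp [hmem])
    simp only [Function.comp]
    rw [pvGetD_fresh bd q.1 e hfresh, pvGetD_mem od e h2 q hq.1, hO q.2 (hP2 q hq.1)]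

-- the per-week equality: A's key-set traversal equals B's accumulate-then-normalize
theorem pv_week_eq (bw ow : List (String × List (String × List String)))
    (h1 : (bw.map Prod.fst).Nodup) (h2 : (ow.map Prod.fst).Nodup)
    (hP1 : ∀ p ∈ bw, (p.2.map Prod.fst).Nodup) (hP2 : ∀ p ∈ ow, (p.2.map Prod.fst).Nodup) :
    (PySem.Set.ofList (bw.map Prod.fst ++ ow.map Prod.fst)).foldl (fun week day =>
        week ++ [(day, (PySem.Set.ofList ((pvGetD bw day []).map Prod.fst ++ (pvGetD ow day []).map Prod.fst)).foldl (fun day_data ts =>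
          day_data ++ [(ts, PySem.List.sorted (PySem.Set.union (PySem.Set.ofList (pvGetD (pvGetD bw day []) ts [])) (pvGetD (pvGetD ow day []) ts [])) (fun x => x) false)]) [])]) []
    = (ow.foldl (fun acc p => pvUpsert acc p.1 (pvNormDay p.2) (fun dacc => pvMergeDay dacc p.2))
        (bw.map (fun p => (p.1, pvNormDay p.2)))).map
        (fun p => (p.1, p.2.map (fun q => (q.1, PySem.List.sorted q.2 (fun x => x) false)))) := by
  have hinner : ∀ (b o : List (String × List String)), (b.map Prod.fst).Nodup → (o.map Prod.fst).Nodup →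
      (PySem.Set.ofList (b.map Prod.fst ++ o.map Prod.fst)).map
        (fun ts => (ts, PySem.Set.union (PySem.Set.ofList (pvGetD b ts [])) (pvGetD o ts [])))
      = pvMergeDay (pvNormDay b) o := by
    intro b o hb ho
    exact pv_mergeEq (fun (t : List String) (s : PySem.Set String) => PySem.Set.update s t)
      (fun (t : List String) => PySem.Set.ofList t) ([] : List String)
      (fun x y => PySem.Set.union (PySem.Set.ofList x) y) (fun _ => True)
      (fun _ _ _ _ => rfl) (fun _ _ => rfl) (fun _ _ => rfl)
      b o hb ho (fun _ _ => trivial) (fun _ _ => trivial)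
  have houter := pv_mergeEq
    (fun (slots : List (String × List String)) (dacc : List (String × PySem.Set String)) => pvMergeDay dacc slots)
    (fun (slots : List (String × List String)) => pvNormDay slots)
    ([] : List (String × List String))
    (fun bd od => (PySem.Set.ofList (bd.map Prod.fst ++ od.map Prod.fst)).map
        (fun ts => (ts, PySem.Set.union (PySem.Set.ofList (pvGetD bd ts [])) (pvGetD od ts []))))
    (fun w => (w.map Prod.fst).Nodup)
    (fun b o hb ho => hinner b o hb ho)
    (fun b hb => (hinner b [] hb (by simp)).trans (by simp [pvMergeDay]))
    (fun o ho => (hinner [] o (by simp) ho).trans (by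
      have h3 := pv_foldl_upsert (fun (t : List String) (s : PySem.Set String) => PySem.Set.update s t)
        (fun (t : List String) => PySem.Set.ofList t) o [] ho (by simp)
      simpa [pvMergeDay, pvNormDay] using h3))
    bw ow h1 h2 hP1 hP2
  rw [← houter, List.map_map]
  simp only [PySem.List.foldl_append_singleton_eq_map, List.nil_append]
  apply List.map_congr_left
  intro k _
  simp only [Function.comp, List.map_map]
  rfl

-- ===== VERDICT (by name: the statement is the Claim_ definition above) =====
theorem merge_weekly_teachers_py_spec : Claim_equal_merge_weekly_teachers_py := by
  intro base_wt overlay_wt _ hpre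
  unfold Spec_merge_weekly_teachers_py merge_weekly_teachers_py merge_weekly_teachers_py_alt
  by_cases hb : base_wt = []
  · simp [hb]
  · by_cases ho : overlay_wt = []
    · simp [hb, ho]
    · simp only [if_neg hb, if_neg ho]
      apply List.foldl_ext
      intro acc wi hwi
      rcases hpre with ⟨hpb, hpo⟩
      have hsel : ∀ (L : List (List (String × List (String × List String)))),
          (∀ w ∈ L, (w.map Prod.fst).Nodup ∧ ∀ p ∈ w, (p.2.map Prod.fst).Nodup) →
          (((if wi < L.length then L.getD wi [] else []) : List (String × List (String × List String))).map Prod.fst).Nodup ∧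
          ∀ p ∈ (if wi < L.length then L.getD wi [] else []), (p.2.map Prod.fst).Nodup := by
        intro L hL
        by_cases h : wi < L.length
        · rw [if_pos h, List.getD_eq_getElem L [] h]
          exact hL _ (List.getElem_mem h)
        · rw [if_neg h]
          exact ⟨List.nodup_nil, by simp⟩
      have hA := hsel base_wt hpb
      have hB := hsel overlay_wt hpo
      exact congrArg (fun w => acc ++ [w]) (pv_week_eq _ _ hA.1 hB.1 hA.2 hB.2)
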